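/-
  jsmn_d.bin: EVERY FUNCTION COMPUTES THE PURE MODEL — the closed statements (no hypothesis left but the contracts' own preconditions).

  `Pending` of Prog/Jsmn/D/Assemble.lean is filled with the theorems of the single functions and regions:
      jsmn_parse_primitive   prim_spec        Prog/Jsmn/D/Prim.lean          62 instructions
      jsmn_parse_string      str_spec         Prog/Jsmn/D/Str.lean          106 instructions
      jsmn_parse             open_spec string_spec primitive_spec (D/ParseOpen, ParseStr, ParsePrim), close_spec comma_spec final_spec (D/ParseClose, ParseComma,
                             ParseFinal), the prologue / loop head / pos++ / ':' / epilogue and the composition (D/ParseEntry, ParseHead, Parse)      231 instructions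
  together with alloc_spec, fill_spec (20), init_spec (4), run_spec (23), main_spec (14): all 460 instructions of the eight functions.
-/
import Prog.Jsmn.D.Assemble
import Prog.Jsmn.D.Prim
import Prog.Jsmn.D.Str
import Prog.Jsmn.D.ParseCalls
import Prog.Jsmn.D.ParseClose
import Prog.Jsmn.D.ParseComma
import Prog.Jsmn.D.ParseFinal

namespace X86
namespace J6
namespace D
open X86.User (CodeAt RegsKept Span FlagsOK Layout toNat_add_ofNat toNat_ofNat_lt' add_ofNat_add)
open Jsmn

/-- Every field of `Pending` is a theorem. -/
theorem pending (n : User.Layout) : Pending n :=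
  ⟨fun ha hf => prim_spec ha hf, fun ha hf => str_spec ha hf, fun sf ha => open_spec sf ha, fun sf hs => string_spec sf hs,
   fun sf hp => primitive_spec sf hp, fun sf => close_spec sf n, fun sf => comma_spec sf n, final_spec n⟩

/-- jsmn_parse_primitive of jsmn_d.bin computes `Jsmn.parsePrimitive`. -/
theorem prim_closed (n : User.Layout) : PrimSpec binD n := prim_of (pending n)
/-- jsmn_parse_string of jsmn_d.bin computes `Jsmn.parseString`. -/
theorem str_closed (n : User.Layout) : StrSpec binD n := str_of (pending n)
/-- **jsmn_parse of jsmn_d.bin computes `Jsmn.parseFuel`**: under `Inv` and the layout hypotheses of `ScanPre`, for whatever fuel makes the model answer, the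
machine code reaches its return address with the model's result in eax, the model's parser state and tokens in memory, the callee-saved registers
restored, and nothing changed outside its 88-byte stack window, the parser struct and the token array (`ScanPost`). -/
theorem parse_closed (n : User.Layout) : ParseSpec binD n := parse_of (pending n)
/-- jsmn_run of jsmn_d.bin: jsmn_init, then jsmn_parse. -/
theorem run_closed (n : User.Layout) : RunSpec binD n := run_of (pending n)
/-- jsmn_main of jsmn_d.bin leaves `encodeResult r tokens` at `out` and returns its length. -/
theorem main_closed (n : User.Layout) : MainSpec binD n := main_of (pending n)

end D
end J6
end X86

#print axioms X86.J6.D.main_closed
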